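-- pv_equiv track=rewrite | github.com/rminchev1/TradingCrew | webui/callbacks/ux_callbacks.py | _extract_key_insight
-- ===== SOURCE A (Python) =====
-- def _extract_key_insight(report_text, report_type):
--     """Extract a brief key insight from a report (max 60 chars)."""
--     if not report_text:
--         return None
--
--     # Clean and truncate
--     text = report_text.strip()
--
--     # Look for key phrases
--     key_phrases = ["bullish", "bearish", "neutral", "uptrend", "downtrend",
--                    "positive", "negative", "strong", "weak", "momentum",
--                    "support", "resistance", "breakout", "breakdown"]
--
--     # Find sentences containing key phrases
--     sentences = text.replace('\n', ' ').split('.')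
--     for sentence in sentences[:5]:  # Check first 5 sentences
--         sentence = sentence.strip()
--         for phrase in key_phrases:
--             if phrase.lower() in sentence.lower():
--                 # Found a relevant sentence, truncate it
--                 if len(sentence) > 55:
--                     return sentence[:52] + "..."
--                 return sentence
--
--     # Fallback: just return first part of report
--     first_line = sentences[0].strip() if sentences else text[:55]
--     if len(first_line) > 55:
--         return first_line[:52] + "..."
--     return first_line if first_line else None
-- ===== SOURCE B (Python) =====
-- _KEY_PHRASES = ["bullish", "bearish", "neutral", "uptrend", "downtrend",
--                 "positive", "negative", "strong", "weak", "momentum",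
--                 "support", "resistance", "breakout", "breakdown"]
--
--
-- def _first_idx(p, lows):
--     """First index of a (pre-lowered) sentence containing phrase p, else len(lows)."""
--     for i, low in enumerate(lows):
--         if p in low:
--             return i
--     return len(lows)
--
--
-- def _extract_key_insight(report_text, report_type):
--     if not report_text:
--         return None
--     sentences = report_text.strip().replace('\n', ' ').split('.')
--     cands = [s.strip() for s in sentences[:5]]
--     lows = [c.lower() for c in cands]
--     # Loop interchange: phrase-major argmin of first-matching-sentence indices,
--     # instead of A's sentence-major scan with an inner phrase loop.
--     best = min(_first_idx(p, lows) for p in _KEY_PHRASES)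
--     chosen = cands[best] if best < len(cands) else cands[0]
--     if len(chosen) > 55:
--         return chosen[:52] + "..."
--     return chosen or None
-- ===== Notes on version B (the rewrite author's own statement) =====
-- stated objective: alternative
-- what changed: Interchanges the loop nesting: instead of A's sentence-major scan (for each of the first 5 sentences, an inner loop testing every phrase), B is phrase-major — it pre-strips and pre-lowers the candidate sentences once, computes for each phrase the index of the first sentence containing it, and takes the minimum of these indices (argmin accumulator) to select the sentence; truncation/fallback are then a single shared tail.
import Mathlib
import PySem

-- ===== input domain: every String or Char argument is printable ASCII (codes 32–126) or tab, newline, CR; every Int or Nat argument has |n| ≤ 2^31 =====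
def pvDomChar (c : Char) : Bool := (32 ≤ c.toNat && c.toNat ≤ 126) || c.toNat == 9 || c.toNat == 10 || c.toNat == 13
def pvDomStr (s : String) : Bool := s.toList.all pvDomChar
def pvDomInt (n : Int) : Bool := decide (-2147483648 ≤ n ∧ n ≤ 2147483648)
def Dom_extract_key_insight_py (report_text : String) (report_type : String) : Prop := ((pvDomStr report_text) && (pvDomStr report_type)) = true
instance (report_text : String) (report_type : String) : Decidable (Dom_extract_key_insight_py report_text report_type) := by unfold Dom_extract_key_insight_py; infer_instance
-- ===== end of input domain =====

-- B replaces A's sentence-major scan (inner loop over phrases per sentence) by a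
-- phrase-major argmin: for each phrase the first matching sentence index, then the
-- minimum of those indices selects the sentence; objective: alternative, not claimed faster.


-- ===== PORT A =====
def pvKeyPhrases : List (List Char) :=
  ["bullish".toList, "bearish".toList, "neutral".toList, "uptrend".toList, "downtrend".toList,
   "positive".toList, "negative".toList, "strong".toList, "weak".toList, "momentum".toList,
   "support".toList, "resistance".toList, "breakout".toList, "breakdown".toList]

-- A's sentence loop: strip, then for each phrase test 'phrase.lower() in sentence.lower()';
-- on a hit return the (possibly truncated) sentence, else continue.
def pvALoop : List (List Char) → Option String
  | [] => none
  | sent :: rest =>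
    let s := PySem.Chars.strip sent
    if pvKeyPhrases.any (fun p => PySem.Chars.isIn (PySem.Chars.lower p) (PySem.Chars.lower s)) then
      if s.length > 55 then some (String.ofList (PySem.Chars.slice s none (some 52) ++ "...".toList))
      else some (String.ofList s)
    else pvALoop rest

def extract_key_insight_py (report_text : String) (report_type : String) : Option String :=
  if report_text.toList = [] then none
  else
    let text := PySem.Chars.strip report_text.toList
    let sentences := PySem.Chars.splitOn (PySem.Chars.replace text ['\n'] [' ']) ['.']
    match pvALoop (PySem.List.slice sentences none (some 5)) with
    | some r => some r
    | none =>
      let first_line := if sentences ≠ [] then PySem.Chars.strip (sentences.headD []) else PySem.Chars.slice text none (some 55)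
      if first_line.length > 55 then some (String.ofList (PySem.Chars.slice first_line none (some 52) ++ "...".toList))
      else if first_line ≠ [] then some (String.ofList first_line) else none

-- ===== PORT B =====
-- first index of a (pre-lowered) sentence containing phrase p, else len(lows)
def pvFirstIdx (p : List Char) : List (List Char) → Nat
  | [] => 0
  | low :: rest => if PySem.Chars.isIn p low then 0 else pvFirstIdx p rest + 1

-- best = min(_first_idx(p, lows) for p in _KEY_PHRASES); the generator is nonempty (14 phrases)
def pvBest (lows : List (List Char)) : Nat :=
  (PySem.List.min? (pvKeyPhrases.map (fun p => pvFirstIdx p lows)) (fun y => y)).getD 0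

def extract_key_insight_py_alt (report_text : String) (report_type : String) : Option String :=
  if report_text.toList = [] then none
  else
    let sentences := PySem.Chars.splitOn (PySem.Chars.replace (PySem.Chars.strip report_text.toList) ['\n'] [' ']) ['.']
    let cands := (PySem.List.slice sentences none (some 5)).map PySem.Chars.strip
    let lows := cands.map PySem.Chars.lower
    let best := pvBest lows
    let chosen := if best < cands.length then cands.getD best [] else cands.headD []
    if chosen.length > 55 then some (String.ofList (PySem.Chars.slice chosen none (some 52) ++ "...".toList))
    else if chosen ≠ [] then some (String.ofList chosen) else none

-- ===== PRECONDITION & SPEC =====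
def Spec_extract_key_insight_py (report_text : String) (report_type : String) (out : Option String) : Prop := out = extract_key_insight_py_alt report_text report_type
instance (report_text : String) (report_type : String) (out : Option String) : Decidable (Spec_extract_key_insight_py report_text report_type out) := by unfold Spec_extract_key_insight_py; infer_instance

-- ===== CLAIM (what is proved, stated in full; the proofs are below) =====
def Claim_equal_extract_key_insight_py : Prop := ∀ (report_text : String) (report_type : String), Dom_extract_key_insight_py report_text report_type → Spec_extract_key_insight_py report_text report_type (extract_key_insight_py report_text report_type)

-- ===== LEMMAS AND PROOFS =====

-- does any key phrase occur in this (lowered) sentence?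
def pvAnyMatch (low : List Char) : Bool := pvKeyPhrases.any (fun p => PySem.Chars.isIn p low)

-- first index where any phrase matches, else length
def pvAnyIdx : List (List Char) → Nat
  | [] => 0
  | low :: rest => if pvAnyMatch low then 0 else pvAnyIdx rest + 1

def pvBrief (s : List Char) : List Char :=
  if s.length > 55 then PySem.Chars.slice s none (some 52) ++ "...".toList else s

lemma pv_splitOn_go_ne_nil (sep : List Char) : ∀ (fuel : Nat) (l cur : List Char) (acc : List (List Char)),
    PySem.Chars.splitOn.go sep fuel l cur acc ≠ [] := by
  intro fuel
  induction fuel with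
  | zero => intro l cur acc; simp [PySem.Chars.splitOn.go]
  | succ n ih =>
    intro l cur acc
    cases l with
    | nil => simp [PySem.Chars.splitOn.go]
    | cons c rest =>
      rw [PySem.Chars.splitOn.go]
      split
      · exact ih _ _ _
      · exact ih _ _ _

lemma pv_splitOn_ne_nil (s sep : List Char) : PySem.Chars.splitOn s sep ≠ [] := by
  unfold PySem.Chars.splitOn; exact pv_splitOn_go_ne_nil _ _ _ _ _

lemma pv_phrases_fixed : ∀ p ∈ pvKeyPhrases, PySem.Chars.lower p = p ∧ p ≠ [] := by decide

-- A's per-sentence test equals pvAnyMatch on the lowered sentence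
lemma pv_anyA_eq (s : List Char) :
    pvKeyPhrases.any (fun p => PySem.Chars.isIn (PySem.Chars.lower p) s) = pvAnyMatch s := by
  unfold pvAnyMatch
  rw [Bool.eq_iff_iff]
  simp only [List.any_eq_true]
  constructor
  · rintro ⟨p, hp, hin⟩
    exact ⟨p, hp, by rwa [(pv_phrases_fixed p hp).1] at hin⟩
  · rintro ⟨p, hp, hin⟩
    exact ⟨p, hp, by rwa [(pv_phrases_fixed p hp).1]⟩

lemma pv_anyMatch_ne_nil (s : List Char) (h : pvAnyMatch (PySem.Chars.lower s) = true) : s ≠ [] := by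
  intro hs; subst hs; revert h; decide

-- foldl min commutes with +1 on Nat
lemma pv_foldl_min_succ : ∀ (t : List Nat) (x : Nat),
    (t.map (fun n => n + 1)).foldl min (x + 1) = t.foldl min x + 1 := by
  intro t
  induction t with
  | nil => intro x; rfl
  | cons y ys ih =>
    intro x
    simp only [List.map_cons, List.foldl_cons]
    rw [show min (x + 1) (y + 1) = min x y + 1 by omega]
    exact ih _

lemma pv_min?_succ (l : List Nat) :
    PySem.List.min? (l.map (fun n => n + 1)) (fun y => y) =
      (PySem.List.min? l (fun y => y)).map (fun n => n + 1) := by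
  cases l with
  | nil => rfl
  | cons x xs =>
    simp only [List.map_cons, PySem.List.min?_id_cons, Option.map_some]
    rw [pv_foldl_min_succ]

-- loop interchange: the min over phrases of first-match indices is the first index
-- where any phrase matches
lemma pv_best_eq : ∀ lows : List (List Char), pvBest lows = pvAnyIdx lows := by
  intro lows
  induction lows with
  | nil => decide
  | cons low rest ih =>
    by_cases h : pvAnyMatch low = true
    · -- some phrase has first index 0, so the min is 0
      unfold pvBest
      have h' := h
      unfold pvAnyMatch at h'
      rw [List.any_eq_true] at h'
      obtain ⟨p, hp, hin⟩ := h' 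
      have h0 : (0 : Nat) ∈ pvKeyPhrases.map (fun p => pvFirstIdx p (low :: rest)) := by
        refine List.mem_map.mpr ⟨p, hp, ?_⟩
        simp [pvFirstIdx, hin]
      have hne : pvKeyPhrases.map (fun p => pvFirstIdx p (low :: rest)) ≠ [] := by
        simp [pvKeyPhrases]
      cases hm : PySem.List.min? (pvKeyPhrases.map (fun p => pvFirstIdx p (low :: rest))) (fun y => y) with
      | none => exact absurd ((PySem.List.min?_eq_none_iff _ _).mp hm) hne
      | some m =>
        have hle := PySem.List.min?_isMin hm 0 h0
        have hm0 : m = 0 := Nat.le_zero.mp hle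
        rw [show pvAnyIdx (low :: rest) = if pvAnyMatch low = true then 0 else pvAnyIdx rest + 1 from rfl, if_pos h]
        simpa using hm0
    · -- no phrase matches this sentence: every first index is (index in rest) + 1
      have hcongr : pvKeyPhrases.map (fun p => pvFirstIdx p (low :: rest)) =
          (pvKeyPhrases.map (fun p => pvFirstIdx p rest)).map (fun n => n + 1) := by
        rw [List.map_map]
        apply List.map_congr_left
        intro p hp
        have : PySem.Chars.isIn p low = false := by
          by_contra hc
          exact h (List.any_eq_true.mpr ⟨p, hp, by simpa using hc⟩)
        simp [pvFirstIdx, this, Function.comp]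
      unfold pvBest
      rw [hcongr, pv_min?_succ]
      have hne : pvKeyPhrases.map (fun p => pvFirstIdx p rest) ≠ [] := by
        simp [pvKeyPhrases]
      cases hm : PySem.List.min? (pvKeyPhrases.map (fun p => pvFirstIdx p rest)) (fun y => y) with
      | none => exact absurd ((PySem.List.min?_eq_none_iff _ _).mp hm) hne
      | some m =>
        have : pvBest rest = m := by unfold pvBest; rw [hm]; rfl
        simp [pvAnyIdx, h, ← ih, this]

-- at the found index some phrase really matches
lemma pv_anyIdx_getD : ∀ lows : List (List Char), pvAnyIdx lows < lows.length →
    pvAnyMatch (lows.getD (pvAnyIdx lows) []) = true := by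
  intro lows
  induction lows with
  | nil => intro h; simp [pvAnyIdx] at h
  | cons low rest ih =>
    intro h
    by_cases hm : pvAnyMatch low = true
    · simp [pvAnyIdx, hm]
    · rw [show pvAnyIdx (low :: rest) = if pvAnyMatch low = true then 0 else pvAnyIdx rest + 1 from rfl, if_neg hm] at h ⊢
      simp only [List.length_cons] at h
      have h' : pvAnyIdx rest < rest.length := by omega
      simpa using ih h' 

-- A's sentence loop returns the sentence at the first any-match index (briefed), if any
lemma pv_loop_eq : ∀ L : List (List Char),
    pvALoop L =
      (if pvAnyIdx (L.map (fun s => PySem.Chars.lower (PySem.Chars.strip s))) < L.length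
       then some (String.ofList (pvBrief (PySem.Chars.strip
             (L.getD (pvAnyIdx (L.map (fun s => PySem.Chars.lower (PySem.Chars.strip s)))) []))))
       else none) := by
  intro L
  induction L with
  | nil => simp [pvALoop, pvAnyIdx]
  | cons sent rest ih =>
    simp only [pvALoop, List.map_cons]
    rw [pv_anyA_eq]
    by_cases h : pvAnyMatch (PySem.Chars.lower (PySem.Chars.strip sent)) = true
    · by_cases hl : 55 < (PySem.Chars.strip sent).length <;>
        simp [pvAnyIdx, h, pvBrief, hl]
    · simp only [h, if_false, Bool.false_eq_true]
      rw [ih]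
      simp only [pvAnyIdx, h, Bool.false_eq_true, if_false]
      by_cases hlt : pvAnyIdx (rest.map (fun s => PySem.Chars.lower (PySem.Chars.strip s))) < rest.length
      · simp [hlt]
      · simp [hlt]

lemma pv_getD_map (L : List (List Char)) (f : List Char → List Char) (b : Nat) (hb : b < L.length) :
    (L.map f).getD b [] = f (L.getD b []) := by
  simp [List.getD_eq_getElem?_getD, List.getElem?_map, List.getElem?_eq_getElem hb]

-- ===== VERDICT (by name: the statement is the Claim_ definition above) =====
set_option maxHeartbeats 1000000 in
theorem extract_key_insight_py_spec : Claim_equal_extract_key_insight_py := by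
  intro report_text report_type _
  unfold Spec_extract_key_insight_py extract_key_insight_py extract_key_insight_py_alt
  by_cases h : report_text.toList = []
  · rw [if_pos h, if_pos h]
  · simp only [if_neg h]
    set sentences := PySem.Chars.splitOn (PySem.Chars.replace (PySem.Chars.strip report_text.toList) ['\n'] [' ']) ['.'] with hsent
    set L := PySem.List.slice sentences none (some 5) with hL
    have hmapmap : (L.map PySem.Chars.strip).map PySem.Chars.lower
        = L.map (fun s => PySem.Chars.lower (PySem.Chars.strip s)) := by
      rw [List.map_map]; rfl
    rw [pv_loop_eq, pv_best_eq, hmapmap]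
    set b := pvAnyIdx (L.map (fun s => PySem.Chars.lower (PySem.Chars.strip s))) with hb
    by_cases hlt : b < L.length
    · -- a key phrase was found: both return the briefed matched sentence
      have hlt' : b < (L.map PySem.Chars.strip).length := by simpa using hlt
      rw [if_pos hlt, if_pos hlt']
      have hchosen : (L.map PySem.Chars.strip).getD b [] = PySem.Chars.strip (L.getD b []) :=
        pv_getD_map L PySem.Chars.strip b hlt
      have hmatch : pvAnyMatch (PySem.Chars.lower (PySem.Chars.strip (L.getD b []))) = true := by
        have := pv_anyIdx_getD (L.map (fun s => PySem.Chars.lower (PySem.Chars.strip s))) (by simpa using hlt)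
        rwa [← hb, pv_getD_map L _ b hlt] at this
      have hne : PySem.Chars.strip (L.getD b []) ≠ [] := pv_anyMatch_ne_nil _ hmatch
      rw [hchosen]
      unfold pvBrief
      by_cases hlen : (PySem.Chars.strip (L.getD b [])).length > 55
      · rw [if_pos hlen, if_pos hlen]
      · rw [if_neg hlen, if_neg hlen, if_pos hne]
    · -- no key phrase in the first five sentences: both fall back to the first sentence
      rw [if_neg hlt]
      have hsne : sentences ≠ [] := pv_splitOn_ne_nil _ _
      have htake : L = sentences.take 5 := by
        rw [hL]
        have := PySem.List.slice_to_natCast sentences 5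
        simpa using this
      obtain ⟨x, xs, hx⟩ := List.exists_cons_of_ne_nil hsne
      have hhead : (L.map PySem.Chars.strip).headD [] = PySem.Chars.strip (sentences.headD []) := by
        rw [htake, hx]; rfl
      have hcl : ¬ b < (L.map PySem.Chars.strip).length := by simpa using hlt
      rw [if_neg hcl, hhead, if_pos hsne]
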